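-- pv_equiv track=rewrite | github.com/pypi-data/pypi-mirror-398 | packages/centrex-tlf/centrex_tlf-0.1.8.4-cp311-cp311-manylinux_2_28_x86_64.whl/centrex_tlf/utils/multipass.py | multipass_prism_order
-- ===== SOURCE A (Python) =====
-- from typing import List, Sequence, cast, overload
--
-- def multipass_prism_order(passes: int) -> List[int]:
--     """Determine spatial ordering of passes in a two-prism multipass arrangement.
--
--     In a multipass cell using two prisms, the beam reflects between prisms creating
--     spatially separated passes. This function calculates the physical order in which
--     the passes appear spatially.
--
--     Args:
--         passes (int): Total number of passes through the cell (must be odd).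
--
--     Returns:
--         List[int]: Spatial ordering of passes (1-indexed).
--
--     Raises:
--         ValueError: If passes is even (two-prism multipass requires odd number).
--
--     Example:
--         >>> multipass_prism_order(5)
--         [1, 4, 3, 2, 5]
--         >>> multipass_prism_order(7)
--         [1, 6, 5, 4, 3, 2, 7]
--
--     Note:
--         The pattern alternates: center pass, outer passes work inward, final center pass.
--     """
--     if passes % 2 == 0:
--         raise ValueError("Number of passes must be odd for two-prism multipass")
--
--     npass = [1]
--     for p in range(1, passes):
--         if p % 2 == 0:
--             npass.append(p + 1)
--         else:
--             npass.append(passes - p)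
--     return npass
-- ===== SOURCE B (Python) =====
-- def multipass_prism_order(passes: int):
--     """Scatter formulation: compute each pass's spatial slot directly and
--     write it there, instead of walking slots and deciding each slot's pass."""
--     if passes % 2 == 0:
--         raise ValueError("Number of passes must be odd for two-prism multipass")
--     out = [1] + [0] * (passes - 1)
--     for v in range(2, passes + 1):
--         # odd passes sit at slot v-1 (even slots), even passes at slot passes-v
--         out[v - 1 if v % 2 else passes - v] = v
--     return out
-- ===== Notes on version B (the rewrite author's own statement) =====
-- stated objective: alternative
-- what changed: Inverts the construction: instead of walking output slots and deciding each slot's pass number with a parity branch, B allocates the output list once and scatters each pass number v directly into its computed spatial slot (v-1 for odd v, passes-v for even v).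
import Mathlib
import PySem

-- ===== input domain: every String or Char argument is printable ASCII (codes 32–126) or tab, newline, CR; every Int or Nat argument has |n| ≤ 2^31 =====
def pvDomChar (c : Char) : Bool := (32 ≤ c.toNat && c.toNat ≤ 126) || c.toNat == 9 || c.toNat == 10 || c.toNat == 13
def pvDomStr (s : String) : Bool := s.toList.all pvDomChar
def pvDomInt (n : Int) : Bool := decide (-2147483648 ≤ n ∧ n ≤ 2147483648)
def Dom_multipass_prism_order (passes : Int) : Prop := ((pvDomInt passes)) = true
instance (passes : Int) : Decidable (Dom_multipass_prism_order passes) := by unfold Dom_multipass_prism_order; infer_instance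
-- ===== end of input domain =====

-- B inverts the construction: it allocates the output once and scatters each pass
-- number into its computed spatial slot, instead of deciding each slot's pass with
-- a parity branch while walking the slots; same cost, different algorithm shape.

-- ===== PORT A =====
def multipass_prism_order (passes : Int) : List Int :=
  (PySem.List.pyRange 1 passes 1).foldl
    (fun npass p =>
      if PySem.Int.mod p 2 = 0 then npass ++ [p + 1] else npass ++ [passes - p])
    [1]

-- ===== PORT B =====
-- out[idx] = v ported with pySetD; for every iteration reached (odd passes ≥ 3)
-- the index is in range, so Python never raises there and pySetD is exact.
def multipass_prism_order_alt (passes : Int) : List Int :=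
  (PySem.List.pyRange 2 (passes + 1) 1).foldl
    (fun out v =>
      PySem.List.pySetD out (if PySem.Int.mod v 2 ≠ 0 then v - 1 else passes - v) v)
    ([1] ++ List.replicate (passes - 1).toNat 0)

-- ===== PRECONDITION & SPEC =====
-- Pre_ excludes exactly the even inputs, on which A raises ValueError.
def Pre_multipass_prism_order (passes : Int) : Prop := PySem.Int.mod passes 2 ≠ 0
instance (passes : Int) : Decidable (Pre_multipass_prism_order passes) := by unfold Pre_multipass_prism_order; infer_instance
def pvWitness_multipass_prism_order : Int := 7
def Spec_multipass_prism_order (passes : Int) (out : List Int) : Prop := out = multipass_prism_order_alt passes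
instance (passes : Int) (out : List Int) : Decidable (Spec_multipass_prism_order passes out) := by unfold Spec_multipass_prism_order; infer_instance

-- ===== CLAIM (what is proved, stated in full; the proofs are below) =====
def Claim_equal_multipass_prism_order : Prop := ∀ (passes : Int), Dom_multipass_prism_order passes → Pre_multipass_prism_order passes → Spec_multipass_prism_order passes (multipass_prism_order passes)

-- ===== LEMMAS AND PROOFS =====

-- folding list-writes preserves length
theorem length_foldl_set (ws : List (Nat × Int)) (L : List Int) :
    (ws.foldl (fun l p => l.set p.1 p.2) L).length = L.length := by
  induction ws generalizing L with
  | nil => rfl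
  | cons w ws ih => simp [List.foldl_cons, ih]

-- a fold of writes that never touches index j leaves slot j alone
theorem foldl_set_untouched (ws : List (Nat × Int)) (L : List Int) (j : Nat)
    (h : ∀ w ∈ ws, w.1 ≠ j) :
    (ws.foldl (fun l p => l.set p.1 p.2) L)[j]? = L[j]? := by
  induction ws generalizing L with
  | nil => rfl
  | cons w ws ih =>
    rw [List.foldl_cons, ih _ (fun w hw => h w (List.mem_cons_of_mem _ hw)),
        List.getElem?_set_ne (h w (List.mem_cons_self))]

-- a write at j not followed by another write at j determines slot j
theorem foldl_set_hit (ws1 ws2 : List (Nat × Int)) (L : List Int) (j : Nat) (v : Int)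
    (h2 : ∀ w ∈ ws2, w.1 ≠ j) (hj : j < L.length) :
    ((ws1 ++ (j, v) :: ws2).foldl (fun l p => l.set p.1 p.2) L)[j]? = some v := by
  rw [List.foldl_append, List.foldl_cons, foldl_set_untouched ws2 _ j h2]
  rw [List.getElem?_set_self (by rw [length_foldl_set]; exact hj)]

-- slot index of pass number (2 + i), as a Nat, for passes = 2k+1
def pvSlot (k i : Nat) : Nat := if i % 2 = 1 then 1 + i else 2 * k - 1 - i

-- the write list of B, for passes = 2k+1
def pvWrites (k : Nat) : List (Nat × Int) :=
  (List.range (2 * k)).map (fun i => (pvSlot k i, (2 : Int) + i))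

-- A's loop as an explicit map (index j holds a closed-form value)
theorem multipass_A_eq (k : Nat) :
    multipass_prism_order (2 * (k : Int) + 1) =
      1 :: (List.range (2 * k)).map
        (fun (j : Nat) => if PySem.Int.mod (1 + (j : Int)) 2 = 0 then (1 + (j : Int)) + 1
                  else (2 * (k : Int) + 1) - (1 + (j : Int))) := by
  unfold multipass_prism_order
  have hr : PySem.List.pyRange 1 (2 * (k : Int) + 1) 1 =
      (List.range (2 * k)).map (fun (j : Nat) => 1 + (j : Int)) := by
    have h2k : (2 * (k : Int) + 1 - 1).toNat = 2 * k := by omega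
    rw [PySem.List.pyRange_one, h2k]
  rw [hr]
  rw [show (fun (npass : List Int) (p : Int) =>
        if PySem.Int.mod p 2 = 0 then npass ++ [p + 1] else npass ++ [(2 * (k : Int) + 1) - p]) =
      (fun npass p =>
        npass ++ [if PySem.Int.mod p 2 = 0 then p + 1 else (2 * (k : Int) + 1) - p]) from by
    funext npass p; split <;> rfl]
  rw [PySem.List.foldl_append_singleton_eq_map, List.map_map]
  simp only [List.singleton_append, Function.comp_def]

-- B's loop as a fold of Nat-indexed writes over the zero-filled template
theorem multipass_B_eq (k : Nat) :
    multipass_prism_order_alt (2 * (k : Int) + 1) =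
      (pvWrites k).foldl (fun l p => l.set p.1 p.2)
        (1 :: List.replicate (2 * k) 0) := by
  unfold multipass_prism_order_alt pvWrites
  have hr : PySem.List.pyRange 2 ((2 * (k : Int) + 1) + 1) 1 =
      (List.range (2 * k)).map (fun (i : Nat) => 2 + (i : Int)) := by
    have h2k : ((2 * (k : Int) + 1) + 1 - 2).toNat = 2 * k := by omega
    rw [PySem.List.pyRange_one, h2k]
  have hinit : ([1] ++ List.replicate (2 * (k : Int) + 1 - 1).toNat 0 : List Int) =
      1 :: List.replicate (2 * k) 0 := by
    have : (2 * (k : Int) + 1 - 1).toNat = 2 * k := by omega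
    rw [this]; rfl
  rw [hr, hinit, List.foldl_map, List.foldl_map]
  apply PySem.List.foldl_congr_mem
  intro acc i hi
  rw [List.mem_range] at hi
  have hmod : PySem.Int.mod (2 + (i : Int)) 2 = (i : Int) % 2 := by
    rw [PySem.Int.mod_eq_emod_of_pos (by omega : (0 : Int) < 2)]; omega
  unfold pvSlot
  by_cases hpar : i % 2 = 1
  · rw [if_pos hpar]
    rw [if_pos (by rw [hmod]; omega)]
    rw [PySem.List.pySetD_of_nonneg _ _ (show (0 : Int) ≤ 2 + (i : Int) - 1 from by omega)]
    congr 1; omega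
  · rw [if_neg hpar]
    rw [if_neg (by rw [hmod]; omega)]
    rw [PySem.List.pySetD_of_nonneg _ _ (show (0 : Int) ≤ (2 * (k : Int) + 1) - (2 + (i : Int)) from by omega)]
    congr 1; omega

-- the scattered writes fill exactly A's closed-form list
theorem writes_fill (k : Nat) :
    (pvWrites k).foldl (fun l p => l.set p.1 p.2) (1 :: List.replicate (2 * k) 0) =
      1 :: (List.range (2 * k)).map
        (fun (j : Nat) => if PySem.Int.mod (1 + (j : Int)) 2 = 0 then (1 + (j : Int)) + 1
                  else (2 * (k : Int) + 1) - (1 + (j : Int))) := by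
  apply List.ext_getElem?
  intro j
  by_cases hjlen : j < 2 * k + 1
  · rcases Nat.eq_zero_or_pos j with hj0 | hjpos
    · -- slot 0 is never written
      subst hj0
      rw [foldl_set_untouched]
      · rfl
      · intro w hw
        unfold pvWrites at hw
        rw [List.mem_map] at hw
        obtain ⟨i, hi, rfl⟩ := hw
        rw [List.mem_range] at hi
        unfold pvSlot
        by_cases hpar : i % 2 = 1
        · rw [if_pos hpar]; omega
        · rw [if_neg hpar]; omega
    · -- slot j >= 1 is written last by pass number 2 + i0
      obtain ⟨j', rfl⟩ : ∃ j', j = j' + 1 := ⟨j - 1, by omega⟩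
      set i0 : Nat := if (j' + 1) % 2 = 0 then j' else 2 * k - 2 - j' with hi0
      have hi0lt : i0 < 2 * k := by rw [hi0]; split <;> omega
      have hsplit : pvWrites k =
          ((List.range i0).map (fun i => (pvSlot k i, (2 : Int) + i))) ++
            (pvSlot k i0, (2 : Int) + i0) ::
            ((List.range (2 * k - i0 - 1)).map
              (fun i => (pvSlot k (i0 + 1 + i), (2 : Int) + (i0 + 1 + i)))) := by
        unfold pvWrites
        have htail : List.map ((fun i => (pvSlot k i, (2 : Int) + i)) ∘ fun x => i0 + 1 + x)
            (List.range (2 * k - i0 - 1)) =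
            List.map (fun i => (pvSlot k (i0 + 1 + i), (2 : Int) + ((i0 : Int) + 1 + i)))
            (List.range (2 * k - i0 - 1)) := by
          apply List.map_congr_left
          intro i _
          simp only [Function.comp_def]
          refine Prod.ext rfl ?_
          show (2 : Int) + ((i0 + 1 + i : Nat) : Int) = 2 + ((i0 : Int) + 1 + (i : Int))
          push_cast; ring
        rw [show List.range (2 * k) = List.range ((i0 + 1) + (2 * k - i0 - 1)) from by
              congr 1; omega,
            List.range_add, List.range_succ, List.map_append, List.map_append, List.map_map,
            htail]
        simp
      have hslot0 : pvSlot k i0 = j' + 1 := by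
        unfold pvSlot
        by_cases hpar : (j' + 1) % 2 = 0
        · rw [hi0, if_pos hpar, if_pos (by omega : j' % 2 = 1)]; omega
        · rw [hi0, if_neg hpar, if_neg (by omega : ¬ (2 * k - 2 - j') % 2 = 1)]; omega
      rw [hsplit, hslot0, foldl_set_hit]
      · rw [List.getElem?_cons_succ,
            List.getElem?_map, List.getElem?_range (by omega : j' < 2 * k)]
        simp only [Option.map_some]
        congr 1
        have hmod : PySem.Int.mod (1 + (j' : Int)) 2 = (1 + (j' : Int)) % 2 := by
          rw [PySem.Int.mod_eq_emod_of_pos (by omega : (0 : Int) < 2)]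
        rw [hmod]
        by_cases hpar : (j' + 1) % 2 = 0
        · rw [if_pos (by omega : (1 + (j' : Int)) % 2 = 0), hi0, if_pos hpar]; omega
        · rw [if_neg (by omega : ¬ (1 + (j' : Int)) % 2 = 0), hi0, if_neg hpar]; omega
      · intro w hw
        rw [List.mem_map] at hw
        obtain ⟨i, hi, rfl⟩ := hw
        rw [List.mem_range] at hi
        unfold pvSlot
        by_cases hj : (j' + 1) % 2 = 0
        · simp only [hi0, if_pos hj] at hi ⊢
          split <;> omega
        · simp only [hi0, if_neg hj] at hi ⊢
          split <;> omega
      · simp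
        omega
  · -- out of range on both sides
    rw [List.getElem?_eq_none, List.getElem?_eq_none]
    · simp; omega
    · rw [length_foldl_set]; simp; omega

-- ===== VERDICT (by name: the statement is the Claim_ definition above) =====
theorem multipass_prism_order_spec : Claim_equal_multipass_prism_order := by
  intro passes _ hpre
  unfold Spec_multipass_prism_order
  unfold Pre_multipass_prism_order at hpre
  rw [PySem.Int.mod_eq_emod_of_pos (by omega : (0 : Int) < 2)] at hpre
  by_cases hsmall : passes < 3
  · -- passes ≤ 1 (odd): empty loops on both sides, both return [1]
    unfold multipass_prism_order multipass_prism_order_alt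
    rw [PySem.List.pyRange_one_eq_nil (by omega)]
    rw [show (passes - 1).toNat = 0 from by omega]
    rw [PySem.List.pyRange_one_eq_nil (by omega)] -- may need pyRange 2 _ 1 empty
    simp
  · obtain ⟨k, hk1, hk⟩ : ∃ k : Nat, 1 ≤ k ∧ passes = 2 * (k : Int) + 1 := by
      refine ⟨(passes - 1).toNat / 2, by omega, by omega⟩
    subst hk
    rw [multipass_A_eq k, multipass_B_eq k, writes_fill k]
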